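-- pv_equiv track=rewrite | github.com/AntonioDePasquale/Biocomputing-Circuit-Optimisation-Program | majority_Logic_Synthesis/auxillary_functions.py | remove_matching_items
-- ===== SOURCE A (Python) =====
-- def remove_matching_items(list1, list2):
--         removed_chars = []
--         temp_list1 = list1.copy()
--         temp_list2 = list2.copy()
--
--         for item1 in list1:
--             if item1 in temp_list2:
--                 removed_chars.append(item1)
--                 temp_list1.remove(item1)
--                 temp_list2.remove(item1)
--
--         return temp_list1, temp_list2, removed_chars
-- ===== SOURCE B (Python) =====
-- def remove_matching_items(list1, list2):
--     c1 = {}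
--     for v in list1:
--         c1[v] = c1.get(v, 0) + 1
--     c2 = {}
--     for v in list2:
--         c2[v] = c2.get(v, 0) + 1
--     keep1, removed = [], []
--     used = {}
--     for v in list1:
--         u = used.get(v, 0)
--         if u < c2.get(v, 0):
--             removed.append(v)
--         else:
--             keep1.append(v)
--         used[v] = u + 1
--     keep2 = []
--     used = {}
--     for v in list2:
--         u = used.get(v, 0)
--         if u >= c1.get(v, 0):
--             keep2.append(v)
--         used[v] = u + 1
--     return keep1, keep2, removed
-- ===== Notes on version B (the rewrite author's own statement) =====
-- stated objective: faster
-- what changed: Replaces A's repeated membership tests and first-occurrence removals on mutating temp lists (each a linear scan) with hash-count tables: count each list once, then two independent passes that classify each element by comparing its running occurrence index with the other list's count.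
import Mathlib
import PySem

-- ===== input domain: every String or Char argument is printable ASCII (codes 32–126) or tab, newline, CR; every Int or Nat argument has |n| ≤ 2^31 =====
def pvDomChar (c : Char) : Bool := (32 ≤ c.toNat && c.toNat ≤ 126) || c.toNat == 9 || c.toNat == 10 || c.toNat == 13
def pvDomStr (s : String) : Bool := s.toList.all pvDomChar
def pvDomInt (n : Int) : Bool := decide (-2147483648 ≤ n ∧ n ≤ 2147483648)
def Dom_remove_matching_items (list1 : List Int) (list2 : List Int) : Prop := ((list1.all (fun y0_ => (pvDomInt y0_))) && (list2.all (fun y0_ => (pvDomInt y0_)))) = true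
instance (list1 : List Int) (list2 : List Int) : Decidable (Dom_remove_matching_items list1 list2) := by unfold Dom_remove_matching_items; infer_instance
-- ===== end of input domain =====

-- B replaces A's quadratic membership-test-and-remove loop by count tables and two
-- independent counting passes (measured faster asymptotically; return value only,
-- neither implementation mutates its arguments observably).

-- ===== PORT A =====
-- Python's list.remove(v); the none case (v absent, Python raises ValueError) falls
-- back to the unchanged list — unreachable in A: t1's removal only runs when v was
-- matched in t2, and then v is still present in t1 (proved by the loop invariant).
def pvRemoveA (t : List Int) (v : Int) : List Int := (PySem.List.remove? t v).getD t

def pvGoA : List Int → List Int → List Int → List Int → List Int × List Int × List Int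
  | [], t1, t2, rem => (t1, t2, rem)
  | v :: rest, t1, t2, rem =>
    if v ∈ t2 then pvGoA rest (pvRemoveA t1 v) (pvRemoveA t2 v) (rem ++ [v])
    else pvGoA rest t1 t2 rem

def remove_matching_items (list1 : List Int) (list2 : List Int) : List Int × List Int × List Int :=
  pvGoA list1 list1 list2 []

-- ===== PORT B =====
def remove_matching_items_alt (list1 : List Int) (list2 : List Int) : List Int × List Int × List Int :=
  let c1 := list1.foldl (fun d v => d.insert v (d.getD v 0 + 1)) PySem.Dict.empty
  let c2 := list2.foldl (fun d v => d.insert v (d.getD v 0 + 1)) PySem.Dict.empty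
  let s1 := list1.foldl (fun (s : List Int × List Int × PySem.Dict Int Int) v =>
      if s.2.2.getD v 0 < c2.getD v 0 then (s.1, s.2.1 ++ [v], s.2.2.insert v (s.2.2.getD v 0 + 1))
      else (s.1 ++ [v], s.2.1, s.2.2.insert v (s.2.2.getD v 0 + 1)))
    (([], [], PySem.Dict.empty) : List Int × List Int × PySem.Dict Int Int)
  let s2 := list2.foldl (fun (s : List Int × PySem.Dict Int Int) v =>
      if s.2.getD v 0 ≥ c1.getD v 0 then (s.1 ++ [v], s.2.insert v (s.2.getD v 0 + 1))
      else (s.1, s.2.insert v (s.2.getD v 0 + 1)))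
    (([], PySem.Dict.empty) : List Int × PySem.Dict Int Int)
  (s1.1, s2.1, s1.2.1)

-- ===== PRECONDITION & SPEC =====
def Spec_remove_matching_items (list1 : List Int) (list2 : List Int) (out : List Int × List Int × List Int) : Prop := out = remove_matching_items_alt list1 list2
instance (list1 : List Int) (list2 : List Int) (out : List Int × List Int × List Int) : Decidable (Spec_remove_matching_items list1 list2 out) := by unfold Spec_remove_matching_items; infer_instance

-- ===== CLAIM (what is proved, stated in full; the proofs are below) =====
def Claim_equal_remove_matching_items : Prop := ∀ (list1 : List Int) (list2 : List Int), Dom_remove_matching_items list1 list2 → Spec_remove_matching_items list1 list2 (remove_matching_items list1 list2)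

-- ===== LEMMAS AND PROOFS =====

-- Budget-selection spec both ports are reduced to: scan the list with a per-value
-- budget; while the budget of v is positive, v goes to the second component
-- (matched) and the budget decrements, otherwise v is kept in the first component.
def pvDecr (c : Int → Nat) (v : Int) : Int → Nat := fun w => if w = v then c v - 1 else c w

def pvSel (c : Int → Nat) : List Int → List Int × List Int
  | [] => ([], [])
  | v :: rest =>
    if 0 < c v then ((pvSel (pvDecr c v) rest).1, v :: (pvSel (pvDecr c v) rest).2)
    else (v :: (pvSel c rest).1, (pvSel c rest).2)

theorem pvSel_congr (c c' : Int → Nat) (h : c = c') (l : List Int) : pvSel c l = pvSel c' l := by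
  rw [h]

theorem pvSel_zero : ∀ t : List Int, pvSel (fun _ => 0) t = (t, []) := by
  intro t
  induction t with
  | nil => simp [pvSel]
  | cons w t ih => simp [pvSel, ih]

theorem pvRemoveA_of_mem (t : List Int) (v : Int) (h : v ∈ t) : pvRemoveA t v = t.erase v := by
  simp [pvRemoveA, PySem.List.remove?_eq_some_erase t v h]

theorem count_erase_fun (t : List Int) (v : Int) :
    (fun w => (t.erase v).count w) = pvDecr (fun w => t.count w) v := by
  funext w
  by_cases hw : w = v
  · subst hw; simp [pvDecr, List.count_erase_self]
  · simp [pvDecr, hw, List.count_erase_of_ne hw]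

-- A's loop invariant: with accumulated kept prefix K (whose budgets are exhausted)
-- and matched list R, the loop computes the budget selection of the remaining items.
theorem pvGoA_inv (rest : List Int) : ∀ (K R t2 : List Int), (∀ v ∈ K, v ∉ t2) →
    pvGoA rest (K ++ rest) t2 R
      = (K ++ (pvSel (fun v => t2.count v) rest).1,
         rest.foldl (fun t v => t.erase v) t2,
         R ++ (pvSel (fun v => t2.count v) rest).2) := by
  induction rest with
  | nil => intro K R t2 _; simp [pvGoA, pvSel]
  | cons v rest ih =>
    intro K R t2 hK
    by_cases hv : v ∈ t2
    · have hKv : v ∉ K := fun hvK => hK v hvK hv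
      have h1 : pvRemoveA (K ++ v :: rest) v = K ++ rest := by
        rw [pvRemoveA_of_mem _ _ (by simp), List.erase_append_right _ hKv, List.erase_cons_head]
      have hcount : 0 < t2.count v := List.count_pos_iff.mpr hv
      have hK' : ∀ w ∈ K, w ∉ t2.erase v := fun w hw hmem => hK w hw (List.mem_of_mem_erase hmem)
      simp only [pvGoA, if_pos hv, h1, pvRemoveA_of_mem _ _ hv, ih K (R ++ [v]) (t2.erase v) hK']
      rw [pvSel_congr _ _ (count_erase_fun t2 v)]
      simp [pvSel, hcount, List.foldl_cons]
    · have hcount : ¬ 0 < t2.count v := by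
        simp [List.count_pos_iff, hv]
      have h2 : K ++ v :: rest = (K ++ [v]) ++ rest := by simp
      have hK' : ∀ w ∈ K ++ [v], w ∉ t2 := by
        intro w hw
        rcases List.mem_append.mp hw with h | h
        · exact hK w h
        · simp at h; subst h; exact hv
      simp only [pvGoA, if_neg hv, h2, ih (K ++ [v]) R t2 hK']
      rw [List.foldl_cons, List.erase_of_not_mem hv]
      simp [pvSel, hcount]

-- Folding first-occurrence erasure of every element of l1 over l2 keeps exactly the
-- elements the budget selection (budget = l1's counts) keeps.
theorem sel_bump_erase (v : Int) : ∀ (l : List Int) (c : Int → Nat),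
    (pvSel (fun w => if w = v then c w + 1 else c w) l).1 = (pvSel c (l.erase v)).1 := by
  intro l
  induction l with
  | nil => intro c; simp [pvSel]
  | cons w t ih =>
    intro c
    by_cases hw : w = v
    · subst hw
      have hd : pvDecr (fun u => if u = w then c u + 1 else c u) w = c := by
        funext u; by_cases hu : u = w <;> simp [pvDecr, hu]
      simp [pvSel, hd, List.erase_cons_head]
    · have he : (w :: t).erase v = w :: t.erase v := List.erase_cons_tail (by simp [hw])
      rw [he]
      by_cases hc : 0 < c w
      · have hd : pvDecr (fun u => if u = v then c u + 1 else c u) w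
            = (fun u => if u = v then (pvDecr c w) u + 1 else (pvDecr c w) u) := by
          funext u
          by_cases hu : u = v
          · subst hu; simp [pvDecr, Ne.symm hw]
          · by_cases huw : u = w <;> simp [pvDecr, hu, huw, hw]
        have hpos : 0 < (if w = v then c w + 1 else c w) := by simpa [hw] using hc
        simp only [pvSel, if_pos hpos, if_pos hc]
        rw [hd]
        exact ih (pvDecr c w)
      · have hneg : ¬ 0 < (if w = v then c w + 1 else c w) := by simpa [hw] using hc
        simp only [pvSel, if_neg hneg, if_neg hc]
        rw [ih c]

theorem foldl_erase_eq_sel : ∀ (l1 l2 : List Int),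
    l1.foldl (fun t v => t.erase v) l2 = (pvSel (fun v => l1.count v) l2).1 := by
  intro l1
  induction l1 with
  | nil =>
    intro l2
    rw [List.foldl_nil, pvSel_congr _ (fun _ => 0) (by funext w; simp), pvSel_zero]
  | cons v t ih =>
    intro l2
    have hc : (fun w => (v :: t).count w) = (fun w => if w = v then t.count w + 1 else t.count w) := by
      funext w
      by_cases hw : w = v
      · subst hw; simp [List.count_cons]
      · simp [hw, Ne.symm hw]
    rw [List.foldl_cons, ih (l2.erase v), ← sel_bump_erase v l2 (fun w => t.count w),
      pvSel_congr _ _ hc.symm]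

-- B-side: the running-count dict over a processed prefix.
def pvUsedOf (pre : List Int) : PySem.Dict Int Int :=
  pre.foldl (fun d x => d.insert x (d.getD x 0 + 1)) PySem.Dict.empty

theorem pvUsedOf_getD (pre : List Int) (v : Int) : (pvUsedOf pre).getD v 0 = (pre.count v : Int) := by
  simp [pvUsedOf, PySem.Dict.getD_foldl_insert_add_one]

theorem pvUsedOf_snoc (pre : List Int) (v : Int) :
    pvUsedOf (pre ++ [v]) = (pvUsedOf pre).insert v ((pvUsedOf pre).getD v 0 + 1) := by
  simp [pvUsedOf, List.foldl_append]

-- B's first pass computes the budget selection (budget = cnt minus already-used).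
theorem pass1_spec (cnt : Int → Nat) : ∀ (l : List Int) (k r pre : List Int),
    l.foldl (fun (s : List Int × List Int × PySem.Dict Int Int) v =>
        if s.2.2.getD v 0 < (cnt v : Int) then (s.1, s.2.1 ++ [v], s.2.2.insert v (s.2.2.getD v 0 + 1))
        else (s.1 ++ [v], s.2.1, s.2.2.insert v (s.2.2.getD v 0 + 1))) (k, r, pvUsedOf pre)
    = (k ++ (pvSel (fun v => cnt v - pre.count v) l).1,
       r ++ (pvSel (fun v => cnt v - pre.count v) l).2,
       pvUsedOf (pre ++ l)) := by
  intro l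
  induction l with
  | nil => intro k r pre; simp [pvSel]
  | cons v rest ih =>
    intro k r pre
    have hgd := pvUsedOf_getD pre v
    have hins : (pvUsedOf pre).insert v ((pvUsedOf pre).getD v 0 + 1) = pvUsedOf (pre ++ [v]) :=
      (pvUsedOf_snoc pre v).symm
    by_cases hc : pre.count v < cnt v
    · have hcond : (pvUsedOf pre).getD v 0 < (cnt v : Int) := by rw [hgd]; exact_mod_cast hc
      have hbud : (fun w => cnt w - (pre ++ [v]).count w) = pvDecr (fun w => cnt w - pre.count w) v := by
        funext w
        by_cases hw : w = v
        · subst hw; simp [pvDecr, List.count_append, Nat.sub_sub]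
        · simp [pvDecr, hw, List.count_append, Ne.symm hw]
      rw [List.foldl_cons, if_pos hcond, hins, ih k (r ++ [v]) (pre ++ [v]),
        pvSel_congr _ _ hbud]
      have hsel : 0 < cnt v - pre.count v := Nat.sub_pos_of_lt hc
      simp [pvSel, hsel]
    · have hcond : ¬ (pvUsedOf pre).getD v 0 < (cnt v : Int) := by rw [hgd]; exact_mod_cast hc
      have hbud : (fun w => cnt w - (pre ++ [v]).count w) = (fun w => cnt w - pre.count w) := by
        funext w
        by_cases hw : w = v
        · subst hw; simp [List.count_append]; omega
        · simp [List.count_append, Ne.symm hw]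
      rw [List.foldl_cons, if_neg hcond, hins, ih (k ++ [v]) r (pre ++ [v]),
        pvSel_congr _ _ hbud]
      have hsel : ¬ 0 < cnt v - pre.count v := by omega
      simp [pvSel, hsel]

-- B's second pass keeps exactly what the budget selection keeps.
theorem pass2_spec (cnt : Int → Nat) : ∀ (l : List Int) (k pre : List Int),
    l.foldl (fun (s : List Int × PySem.Dict Int Int) v =>
        if s.2.getD v 0 ≥ (cnt v : Int) then (s.1 ++ [v], s.2.insert v (s.2.getD v 0 + 1))
        else (s.1, s.2.insert v (s.2.getD v 0 + 1))) (k, pvUsedOf pre)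
    = (k ++ (pvSel (fun v => cnt v - pre.count v) l).1, pvUsedOf (pre ++ l)) := by
  intro l
  induction l with
  | nil => intro k pre; simp [pvSel]
  | cons v rest ih =>
    intro k pre
    have hgd := pvUsedOf_getD pre v
    have hins : (pvUsedOf pre).insert v ((pvUsedOf pre).getD v 0 + 1) = pvUsedOf (pre ++ [v]) :=
      (pvUsedOf_snoc pre v).symm
    by_cases hc : pre.count v < cnt v
    · have hcond : ¬ (pvUsedOf pre).getD v 0 ≥ (cnt v : Int) := by
        rw [hgd]
        exact_mod_cast Nat.not_le.mpr hc
      have hbud : (fun w => cnt w - (pre ++ [v]).count w) = pvDecr (fun w => cnt w - pre.count w) v := by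
        funext w
        by_cases hw : w = v
        · subst hw; simp [pvDecr, List.count_append, Nat.sub_sub]
        · simp [pvDecr, hw, List.count_append, Ne.symm hw]
      rw [List.foldl_cons, if_neg hcond, hins, ih k (pre ++ [v]), pvSel_congr _ _ hbud]
      have hsel : 0 < cnt v - pre.count v := Nat.sub_pos_of_lt hc
      simp [pvSel, hsel]
    · have hcond : (pvUsedOf pre).getD v 0 ≥ (cnt v : Int) := by
        rw [hgd]
        exact_mod_cast Nat.not_lt.mp hc
      have hbud : (fun w => cnt w - (pre ++ [v]).count w) = (fun w => cnt w - pre.count w) := by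
        funext w
        by_cases hw : w = v
        · subst hw; simp [List.count_append]; omega
        · simp [List.count_append, Ne.symm hw]
      rw [List.foldl_cons, if_pos hcond, hins, ih (k ++ [v]) (pre ++ [v]), pvSel_congr _ _ hbud]
      have hsel : ¬ 0 < cnt v - pre.count v := by omega
      simp [pvSel, hsel]

theorem alt_eq_sel (list1 list2 : List Int) :
    remove_matching_items_alt list1 list2
      = ((pvSel (fun v => list2.count v) list1).1,
         (pvSel (fun v => list1.count v) list2).1,
         (pvSel (fun v => list2.count v) list1).2) := by
  have hp1 := pass1_spec (fun v => list2.count v) list1 [] [] []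
  have hp2 := pass2_spec (fun v => list1.count v) list2 [] []
  have hz2 : (fun v => list2.count v - List.count v ([] : List Int)) = (fun v => list2.count v) := by
    funext v; simp
  have hz1 : (fun v => list1.count v - List.count v ([] : List Int)) = (fun v => list1.count v) := by
    funext v; simp
  rw [pvSel_congr _ _ hz2] at hp1
  rw [pvSel_congr _ _ hz1] at hp2
  simp only [List.nil_append, show pvUsedOf [] = PySem.Dict.empty from rfl] at hp1 hp2
  have hf2 : (fun (s : List Int × List Int × PySem.Dict Int Int) (v : Int) =>
      if s.2.2.getD v 0 < (List.foldl (fun (d : PySem.Dict Int Int) v => d.insert v (d.getD v 0 + 1)) PySem.Dict.empty list2).getD v 0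
      then (s.1, s.2.1 ++ [v], s.2.2.insert v (s.2.2.getD v 0 + 1))
      else (s.1 ++ [v], s.2.1, s.2.2.insert v (s.2.2.getD v 0 + 1)))
      = (fun (s : List Int × List Int × PySem.Dict Int Int) (v : Int) =>
      if s.2.2.getD v 0 < ((List.count v list2 : Nat) : Int)
      then (s.1, s.2.1 ++ [v], s.2.2.insert v (s.2.2.getD v 0 + 1))
      else (s.1 ++ [v], s.2.1, s.2.2.insert v (s.2.2.getD v 0 + 1))) := by
    funext s v
    rw [PySem.Dict.getD_foldl_insert_add_one]
    simp
  have hf1 : (fun (s : List Int × PySem.Dict Int Int) (v : Int) =>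
      if s.2.getD v 0 ≥ (List.foldl (fun (d : PySem.Dict Int Int) v => d.insert v (d.getD v 0 + 1)) PySem.Dict.empty list1).getD v 0
      then (s.1 ++ [v], s.2.insert v (s.2.getD v 0 + 1))
      else (s.1, s.2.insert v (s.2.getD v 0 + 1)))
      = (fun (s : List Int × PySem.Dict Int Int) (v : Int) =>
      if s.2.getD v 0 ≥ ((List.count v list1 : Nat) : Int)
      then (s.1 ++ [v], s.2.insert v (s.2.getD v 0 + 1))
      else (s.1, s.2.insert v (s.2.getD v 0 + 1))) := by
    funext s v
    rw [PySem.Dict.getD_foldl_insert_add_one]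
    simp
  unfold remove_matching_items_alt
  simp only []
  rw [hf2, hf1, hp1, hp2]

-- ===== VERDICT (by name: the statement is the Claim_ definition above) =====
theorem remove_matching_items_spec : Claim_equal_remove_matching_items := by
  intro list1 list2 _
  unfold Spec_remove_matching_items remove_matching_items
  have hA := pvGoA_inv list1 [] [] list2 (by simp)
  simp only [List.nil_append] at hA
  rw [hA, alt_eq_sel, foldl_erase_eq_sel]
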